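-- pv_equiv track=rewrite | github.com/pdanbi00/algorithm | 프로그래머스/Lv.1/42840. 모의고사/모의고사.py | solution
-- ===== SOURCE A (Python) =====
-- def solution(answers):
--     answer = [0, 0, 0]
--     first = [1, 2, 3, 4, 5]
--     second = [2, 1, 2, 3, 2, 4, 2, 5]
--     third = [3, 3, 1, 1, 2, 2, 4, 4, 5, 5]
--     for i in range(len(answers)):
--         if first[i%len(first)] == answers[i]:
--             answer[0] += 1
--         if second[i % len(second)] == answers[i]:
--             answer[1] += 1
--         if third[i % len(third)] == answers[i]:
--             answer[2] += 1
--     result = []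
--     for i in range(len(answer)):
--         if answer[i] == max(answer):
--             result.append(i+1)
--     return sorted(result)
-- ===== SOURCE B (Python) =====
-- def solution(answers):
--     # histogram: how many times each value occurs at each index residue mod 40
--     # (40 = lcm of the three pattern lengths 5, 8, 10)
--     hist = {}
--     for i, a in enumerate(answers):
--         k = (i % 40, a)
--         hist[k] = hist.get(k, 0) + 1
--     patterns = [[1, 2, 3, 4, 5],
--                 [2, 1, 2, 3, 2, 4, 2, 5],
--                 [3, 3, 1, 1, 2, 2, 4, 4, 5, 5]]
--     scores = [sum(hist.get((r, p[r % len(p)]), 0) for r in range(40))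
--               for p in patterns]
--     m = max(scores)
--     return [i + 1 for i, s in enumerate(scores) if s == m]
-- ===== Notes on version B (the rewrite author's own statement) =====
-- stated objective: alternative
-- what changed: Instead of comparing every answer against all three cyclic keys in one interleaved loop, B builds one histogram dict keyed by (index mod 40, value) (40 = lcm of the pattern lengths) and reads each pattern's score off the histogram with 40 lookups; max and an enumerate-filter replace A's indexed filter plus sort.
import Mathlib
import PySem

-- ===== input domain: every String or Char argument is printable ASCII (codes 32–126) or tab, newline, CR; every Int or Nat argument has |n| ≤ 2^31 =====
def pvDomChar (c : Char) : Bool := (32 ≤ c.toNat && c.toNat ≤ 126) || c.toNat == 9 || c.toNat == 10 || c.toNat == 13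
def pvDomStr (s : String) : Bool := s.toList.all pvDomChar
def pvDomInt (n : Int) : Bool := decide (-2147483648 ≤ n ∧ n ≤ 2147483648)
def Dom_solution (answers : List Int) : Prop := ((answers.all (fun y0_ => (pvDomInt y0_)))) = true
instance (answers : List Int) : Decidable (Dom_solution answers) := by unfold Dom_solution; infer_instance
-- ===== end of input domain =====

-- B replaces A's element-by-element comparison against the three cyclic keys by a
-- histogram keyed by (index mod 40, value) built once, from which each score is read
-- off with 40 lookups (objective: alternative algorithm, same asymptotic cost).

-- ===== PORT A =====
def solution (answers : List Int) : List Int :=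
  let first : List Int := [1, 2, 3, 4, 5]
  let second : List Int := [2, 1, 2, 3, 2, 4, 2, 5]
  let third : List Int := [3, 3, 1, 1, 2, 2, 4, 4, 5, 5]
  -- the mutable 3-cell list `answer` is the triple state of the fold over range(len(answers))
  let answer : Int × Int × Int :=
    (PySem.List.pyRange 0 (answers.length : Int) 1).foldl
      (fun (ans : Int × Int × Int) i =>
        let a0 := if PySem.List.pyGetD first (PySem.Int.mod i (first.length : Int)) 0 == PySem.List.pyGetD answers i 0 then ans.1 + 1 else ans.1
        let a1 := if PySem.List.pyGetD second (PySem.Int.mod i (second.length : Int)) 0 == PySem.List.pyGetD answers i 0 then ans.2.1 + 1 else ans.2.1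
        let a2 := if PySem.List.pyGetD third (PySem.Int.mod i (third.length : Int)) 0 == PySem.List.pyGetD answers i 0 then ans.2.2 + 1 else ans.2.2
        (a0, a1, a2))
      (0, 0, 0)
  let answerL : List Int := [answer.1, answer.2.1, answer.2.2]
  let result : List Int :=
    (PySem.List.pyRange 0 (answerL.length : Int) 1).foldl
      (fun r i =>
        if PySem.List.pyGetD answerL i 0 == (PySem.List.max? answerL (fun x => x)).getD 0
        then r ++ [i + 1] else r)
      []
  PySem.List.sorted result (fun x => x) false

-- ===== PORT B =====
def solution_alt (answers : List Int) : List Int :=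
  -- hist[(i % 40, a)] = multiplicity, built by the first for-loop
  let hist : PySem.Dict (Int × Int) Int :=
    (PySem.List.enumerate answers 0).foldl
      (fun d ia =>
        let k : Int × Int := (PySem.Int.mod ia.1 40, ia.2)
        d.insert k (d.getD k 0 + 1))
      PySem.Dict.empty
  let patterns : List (List Int) :=
    [[1, 2, 3, 4, 5], [2, 1, 2, 3, 2, 4, 2, 5], [3, 3, 1, 1, 2, 2, 4, 4, 5, 5]]
  -- sum(hist.get((r, p[r % len(p)]), 0) for r in range(40))
  let scores : List Int := patterns.map (fun p =>
    (PySem.List.pyRange 0 40 1).foldl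
      (fun s r => s + hist.getD (r, PySem.List.pyGetD p (PySem.Int.mod r (p.length : Int)) 0) 0) 0)
  let m := (PySem.List.max? scores (fun x => x)).getD 0
  (PySem.List.enumerate scores 0).foldl
    (fun r is => if is.2 == m then r ++ [is.1 + 1] else r) []

-- ===== PRECONDITION & SPEC =====
def Spec_solution (answers : List Int) (out : List Int) : Prop := out = solution_alt answers
instance (answers : List Int) (out : List Int) : Decidable (Spec_solution answers out) := by unfold Spec_solution; infer_instance

-- ===== CLAIM (what is proved, stated in full; the proofs are below) =====
def Claim_equal_solution : Prop := ∀ (answers : List Int), Dom_solution answers → Spec_solution answers (solution answers)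

-- ===== LEMMAS AND PROOFS =====

-- a fold whose triple state has three independent components is the triple of three folds
theorem foldl_triple {α : Type} (l : List α) (f g h : Int → α → Int) (x y z : Int) :
    l.foldl (fun (ans : Int × Int × Int) i => (f ans.1 i, g ans.2.1 i, h ans.2.2 i)) (x, y, z)
      = (l.foldl f x, l.foldl g y, l.foldl h z) := by
  induction l generalizing x y z with
  | nil => rfl
  | cons a t ih => simp [List.foldl, ih]

-- indicator sums over a Nodup list: only the member r = rk can contribute
theorem ind_sum_not_mem (l : List Int) (rk a : Int) (g : Int → Int) (h : rk ∉ l) :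
    (l.map (fun r => if ((rk, a) == (r, g r)) then 1 else 0)).sum = (0 : Nat) := by
  induction l with
  | nil => rfl
  | cons b t ih =>
    simp only [List.mem_cons, not_or] at h
    have hb : ¬ (((rk, a) == (b, g b)) = true) := by
      simp only [beq_iff_eq, Prod.mk.injEq, not_and]
      intro h1 _; exact h.1 h1
    rw [List.map_cons, List.sum_cons, if_neg hb, ih h.2]

theorem ind_sum (l : List Int) (rk a : Int) (g : Int → Int) (hnd : l.Nodup) (hm : rk ∈ l) :
    (l.map (fun r => if ((rk, a) == (r, g r)) then 1 else 0)).sum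
      = (if (a == g rk) then 1 else 0 : Nat) := by
  induction l with
  | nil => cases hm
  | cons b t ih =>
    rcases List.nodup_cons.mp hnd with ⟨hb, hnd'⟩
    rw [List.map_cons, List.sum_cons]
    rcases List.mem_cons.mp hm with h | h
    · subst h
      rw [ind_sum_not_mem t rk a g hb, Nat.add_zero]
      simp [beq_iff_eq, Prod.mk.injEq]
    · have hrkb : rk ≠ b := fun e => hb (e ▸ h)
      have hne : ¬ (((rk, a) == (b, g b)) = true) := by
        simp only [beq_iff_eq, Prod.mk.injEq, not_and]
        intro h1 _; exact hrkb h1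
      rw [if_neg hne, ih hnd' h, Nat.zero_add]

-- the residue-indexed sum of histogram counts equals the direct count of matches
theorem key_sum (p : List Int) (hd : p.length ∣ 40) (xs : List Int) (s : Nat) :
    ((PySem.List.pyRange 0 40 1).map (fun r =>
        ((PySem.List.enumerate xs (s : Int)).map (fun ia => (PySem.Int.mod ia.1 40, ia.2))).count
          (r, PySem.List.pyGetD p (PySem.Int.mod r (p.length : Int)) 0))).sum
      = (PySem.List.enumerate xs (s : Int)).countP
          (fun ia => PySem.List.pyGetD p (PySem.Int.mod ia.1 (p.length : Int)) 0 == ia.2) := by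
  induction xs generalizing s with
  | nil => simp [PySem.List.enumerate_nil, List.sum_eq_zero]
  | cons a t ih =>
    have hcast : ((s : Int) + 1) = ((s + 1 : Nat) : Int) := by push_cast; ring
    rw [PySem.List.enumerate_cons, hcast]
    simp only [List.map_cons, List.count_cons, List.countP_cons]
    -- the new element contributes 1 exactly when the pattern matches at index s
    have h40 : PySem.Int.mod (s : Int) 40 = ((s % 40 : Nat) : Int) := by
      exact_mod_cast PySem.Int.mod_natCast s 40
    have hmem : PySem.Int.mod (s : Int) 40 ∈ PySem.List.pyRange 0 40 1 :=
      PySem.List.mem_pyRange_one.mpr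
        ⟨PySem.Int.mod_nonneg _ (by norm_num), PySem.Int.mod_lt _ (by norm_num)⟩
    have hmm : PySem.Int.mod (PySem.Int.mod (s : Int) 40) (p.length : Int)
        = PySem.Int.mod (s : Int) (p.length : Int) := by
      rw [h40]
      rw [PySem.Int.mod_natCast, PySem.Int.mod_natCast]
      exact_mod_cast congrArg (Nat.cast (R := Int)) (Nat.mod_mod_of_dvd s hd)
    have hind : ((PySem.List.pyRange 0 40 1).map (fun r =>
          if ((PySem.Int.mod (s : Int) 40, a) == (r, PySem.List.pyGetD p (PySem.Int.mod r (p.length : Int)) 0)) then 1 else 0)).sum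
        = (if (PySem.List.pyGetD p (PySem.Int.mod (s : Int) (p.length : Int)) 0 == a) then 1 else 0 : Nat) := by
      rw [ind_sum _ _ _ _ (PySem.List.nodup_pyRange_one 0 40) hmem, hmm]
      simp only [beq_iff_eq]
      exact if_congr eq_comm rfl rfl
    rw [List.sum_map_add, ih (s + 1), hind]

-- B's per-pattern histogram read-off equals A's per-pattern counting component
theorem score_eq (p answers : List Int) (hd : p.length ∣ 40) :
    (PySem.List.pyRange 0 40 1).foldl
      (fun s r => s +
        (((PySem.List.enumerate answers 0).foldl
            (fun (d : PySem.Dict (Int × Int) Int) ia =>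
              let k : Int × Int := (PySem.Int.mod ia.1 40, ia.2)
              d.insert k (d.getD k 0 + 1))
            PySem.Dict.empty).getD
          (r, PySem.List.pyGetD p (PySem.Int.mod r (p.length : Int)) 0) 0)) 0
      = (PySem.List.pyRange 0 (answers.length : Int) 1).foldl
          (fun s i => if PySem.List.pyGetD p (PySem.Int.mod i (p.length : Int)) 0
              == PySem.List.pyGetD answers i 0 then s + 1 else s) 0 := by
  -- the insert loop over enumerate is Counter of the mapped key list
  have hhist :
      (PySem.List.enumerate answers 0).foldl
          (fun (d : PySem.Dict (Int × Int) Int) ia =>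
            let k : Int × Int := (PySem.Int.mod ia.1 40, ia.2)
            d.insert k (d.getD k 0 + 1))
          PySem.Dict.empty
        = PySem.Dict.counter
            ((PySem.List.enumerate answers 0).map (fun ia => (PySem.Int.mod ia.1 40, ia.2))) := by
    rw [← PySem.Dict.foldl_insert_getD_add_one_eq_counter, List.foldl_map]
  rw [hhist]
  rw [PySem.List.foldl_add]
  simp only [PySem.Dict.getD_counter]
  have hsum : ((PySem.List.pyRange 0 40 1).map (fun r =>
      ((((PySem.List.enumerate answers 0).map (fun ia => (PySem.Int.mod ia.1 40, ia.2))).count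
        (r, PySem.List.pyGetD p (PySem.Int.mod r (p.length : Int)) 0) : Nat) : Int))).sum
      = ((((PySem.List.pyRange 0 40 1).map (fun r =>
          ((PySem.List.enumerate answers 0).map (fun ia => (PySem.Int.mod ia.1 40, ia.2))).count
            (r, PySem.List.pyGetD p (PySem.Int.mod r (p.length : Int)) 0))).sum : Nat) : Int) := by
    rw [Nat.cast_list_sum, List.map_map]; rfl
  have hk := key_sum p hd answers 0
  simp only [Nat.cast_zero] at hk
  rw [hsum, hk]
  -- A's component fold is the same countP, read along enumerate
  rw [PySem.List.enumerate_eq_map_pyRange answers 0, List.countP_map]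
  rw [PySem.List.foldl_count_if
        (fun i => PySem.List.pyGetD p (PySem.Int.mod i (p.length : Int)) 0 == PySem.List.pyGetD answers i 0)
        (PySem.List.pyRange 0 ((answers.length : Nat) : Int) 1) 0]
  rfl

-- the final stage: for any score triple, A's sorted indexed filter equals B's enumerate filter
theorem finish3 (s1 s2 s3 : Int) :
  PySem.List.sorted ((PySem.List.pyRange 0 (([s1,s2,s3].length : Nat) : Int) 1).foldl
      (fun r i => if PySem.List.pyGetD [s1,s2,s3] i 0 == (PySem.List.max? [s1,s2,s3] (fun x => x)).getD 0 then r ++ [i+1] else r) []) (fun x => x) false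
  = (PySem.List.enumerate [s1,s2,s3]).foldl
      (fun r is => if is.2 == (PySem.List.max? [s1,s2,s3] (fun x => x)).getD 0 then r ++ [is.1+1] else r) [] := by
  set m := (PySem.List.max? [s1,s2,s3] (fun x => x)).getD 0 with hm
  by_cases h1 : s1 = m <;> by_cases h2 : s2 = m <;> by_cases h3 : s3 = m <;>
    simp [PySem.List.pyRange_one, List.range_succ, PySem.List.enumerate_cons, PySem.List.enumerate_nil,
      h1, h2, h3, PySem.List.pyGetD_ofNat'] <;> decide

-- ===== VERDICT (by name: the statement is the Claim_ definition above) =====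
theorem solution_spec : Claim_equal_solution := by
  unfold Claim_equal_solution Spec_solution
  intro answers _
  unfold solution solution_alt
  simp only [List.map_cons, List.map_nil]
  rw [foldl_triple (PySem.List.pyRange 0 (answers.length : Int) 1)
        (fun s i => if (PySem.List.pyGetD [(1:Int), 2, 3, 4, 5] (PySem.Int.mod i (([(1:Int), 2, 3, 4, 5].length : Nat) : Int)) 0 == PySem.List.pyGetD answers i 0) then s + 1 else s)
        (fun s i => if (PySem.List.pyGetD [(2:Int), 1, 2, 3, 2, 4, 2, 5] (PySem.Int.mod i (([(2:Int), 1, 2, 3, 2, 4, 2, 5].length : Nat) : Int)) 0 == PySem.List.pyGetD answers i 0) then s + 1 else s)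
        (fun s i => if (PySem.List.pyGetD [(3:Int), 3, 1, 1, 2, 2, 4, 4, 5, 5] (PySem.Int.mod i (([(3:Int), 3, 1, 1, 2, 2, 4, 4, 5, 5].length : Nat) : Int)) 0 == PySem.List.pyGetD answers i 0) then s + 1 else s)
        0 0 0]
  rw [← score_eq [(1:Int), 2, 3, 4, 5] answers (by decide),
      ← score_eq [(2:Int), 1, 2, 3, 2, 4, 2, 5] answers (by decide),
      ← score_eq [(3:Int), 3, 1, 1, 2, 2, 4, 4, 5, 5] answers (by decide)]
  exact finish3 _ _ _
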